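-- pv_equiv track=rewrite | github.com/SantaJordan/blueprint-gtm-skills | contact-finder/modules/validation/email_validator.py | is_role_account
-- ===== SOURCE A (Python) =====
-- ROLE_PREFIXES = {
--     'info', 'contact', 'support', 'help', 'sales', 'marketing',
--     'admin', 'administrator', 'webmaster', 'postmaster',
--     'noreply', 'no-reply', 'donotreply', 'do-not-reply',
--     'office', 'team', 'hello', 'hi', 'general', 'inquiries',
--     'billing', 'accounts', 'hr', 'jobs', 'careers', 'press',
--     'media', 'legal', 'privacy', 'security', 'abuse',
-- }
--
-- def is_role_account(email: str) -> bool: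
--     """Check if email is a role/generic account"""
--     if not email:
--         return False
--
--     local_part = email.lower().split('@')[0]
--
--     # Check exact matches
--     if local_part in ROLE_PREFIXES:
--         return True
--
--     # Check prefixes
--     for prefix in ROLE_PREFIXES:
--         if local_part.startswith(f"{prefix}_") or local_part.startswith(f"{prefix}-"):
--             return True
--         if local_part.startswith(f"{prefix}."):
--             return True
--
--     return False
-- ===== SOURCE B (Python) =====
-- ROLE_PREFIXES = {
--     'info', 'contact', 'support', 'help', 'sales', 'marketing',
--     'admin', 'administrator', 'webmaster', 'postmaster',
--     'noreply', 'no-reply', 'donotreply', 'do-not-reply',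
--     'office', 'team', 'hello', 'hi', 'general', 'inquiries',
--     'billing', 'accounts', 'hr', 'jobs', 'careers', 'press',
--     'media', 'legal', 'privacy', 'security', 'abuse',
-- }
--
-- def is_role_account(email: str) -> bool:
--     """Check if email is a role/generic account"""
--     if not email:
--         return False
--     local_part = email.lower().split('@')[0]
--     if local_part in ROLE_PREFIXES:
--         return True
--     # scan the local part's delimiter positions instead of the prefix set
--     for i, ch in enumerate(local_part):
--         if ch in '_-.':
--             if local_part[:i] in ROLE_PREFIXES:
--                 return True
--     return False
-- ===== Notes on version B (the rewrite author's own statement) =====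
-- stated objective: alternative
-- what changed: Instead of looping over the 31-element ROLE_PREFIXES set and testing three startswith patterns per prefix, B scans the local part once and at each delimiter character tests whether the slice before it is in the prefix set.
import Mathlib
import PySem

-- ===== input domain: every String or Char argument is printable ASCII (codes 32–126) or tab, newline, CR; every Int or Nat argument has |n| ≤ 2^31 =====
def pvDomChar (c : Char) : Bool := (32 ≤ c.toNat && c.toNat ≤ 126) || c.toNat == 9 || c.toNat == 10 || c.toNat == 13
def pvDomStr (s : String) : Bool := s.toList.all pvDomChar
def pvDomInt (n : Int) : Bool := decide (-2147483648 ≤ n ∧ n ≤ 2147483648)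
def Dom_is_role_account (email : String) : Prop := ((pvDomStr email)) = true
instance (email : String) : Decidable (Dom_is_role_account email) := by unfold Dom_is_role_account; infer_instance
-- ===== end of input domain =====

-- B scans the local-part's delimiter positions and tests each prefix slice against the set,
-- instead of A's loop over the prefix set with three startswith tests per prefix (objective: alternative).

-- the module-level ROLE_PREFIXES set
def pvROLE : PySem.Set (List Char) := PySem.Set.ofList
  ["info".toList, "contact".toList, "support".toList, "help".toList, "sales".toList,
   "marketing".toList, "admin".toList, "administrator".toList, "webmaster".toList,
   "postmaster".toList, "noreply".toList, "no-reply".toList, "donotreply".toList,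
   "do-not-reply".toList, "office".toList, "team".toList, "hello".toList, "hi".toList,
   "general".toList, "inquiries".toList, "billing".toList, "accounts".toList, "hr".toList,
   "jobs".toList, "careers".toList, "press".toList, "media".toList, "legal".toList,
   "privacy".toList, "security".toList, "abuse".toList]

-- ===== PORT A =====
def is_role_account (email : String) : Bool :=
  if email.toList = [] then false
  else
    let local_part := PySem.List.pyGetD
      (PySem.Chars.splitOn (PySem.Chars.lower email.toList) ['@']) 0 []
    if pvROLE.contains local_part then true
    else
      -- 'for prefix in ROLE_PREFIXES: if … return True' (or-combination; order-independent)
      pvROLE.any (fun p =>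
        PySem.Chars.startswith local_part (p ++ ['_']) ||
        PySem.Chars.startswith local_part (p ++ ['-']) ||
        PySem.Chars.startswith local_part (p ++ ['.']))

-- ===== PORT B =====
def is_role_account_alt (email : String) : Bool :=
  if email.toList = [] then false
  else
    let local_part := PySem.List.pyGetD
      (PySem.Chars.splitOn (PySem.Chars.lower email.toList) ['@']) 0 []
    if pvROLE.contains local_part then true
    else
      -- 'for i, ch in enumerate(local_part): if ch in "_-.": if local_part[:i] in …: return True'
      (PySem.List.enumerate local_part 0).any (fun ic =>
        PySem.Chars.isIn [ic.2] ['_', '-', '.'] &&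
        pvROLE.contains (PySem.List.slice local_part none (some ic.1)))

-- ===== PRECONDITION & SPEC =====
def Spec_is_role_account (email : String) (out : Bool) : Prop := out = is_role_account_alt email
instance (email : String) (out : Bool) : Decidable (Spec_is_role_account email out) := by unfold Spec_is_role_account; infer_instance

-- ===== CLAIM (what is proved, stated in full; the proofs are below) =====
def Claim_equal_is_role_account : Prop := ∀ (email : String), Dom_is_role_account email → Spec_is_role_account email (is_role_account email)

-- ===== LEMMAS AND PROOFS =====

-- A prefix `p` followed by a delimiter `d` starts `lp` iff at position `p.length` of `lp`
-- the character is `d` and the slice before it is `p`: the two loops find the same witnesses.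
theorem pv_loop_eq (lp : List Char) :
    (pvROLE.any (fun p =>
        PySem.Chars.startswith lp (p ++ ['_']) ||
        PySem.Chars.startswith lp (p ++ ['-']) ||
        PySem.Chars.startswith lp (p ++ ['.'])))
    = ((PySem.List.enumerate lp 0).any (fun ic =>
        PySem.Chars.isIn [ic.2] ['_', '-', '.'] &&
        pvROLE.contains (PySem.List.slice lp none (some ic.1)))) := by
  rw [Bool.eq_iff_iff]
  simp only [List.any_eq_true, Bool.or_eq_true, Bool.and_eq_true,
    PySem.Chars.startswith_iff, PySem.Set.contains_iff, PySem.Chars.isIn_iff_infix,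
    PySem.List.mem_enumerate_iff, List.singleton_infix_iff]
  constructor
  · rintro ⟨p, hp, h⟩
    have hd : ∃ d, d ∈ ['_', '-', '.'] ∧ (p ++ [d]) <+: lp := by
      rcases h with (h | h) | h
      · exact ⟨'_', by simp, h⟩
      · exact ⟨'-', by simp, h⟩
      · exact ⟨'.', by simp, h⟩
    obtain ⟨d, hdmem, t, ht⟩ := hd
    subst ht
    refine ⟨((p.length : Int), d), ⟨p.length, by simp, by simp⟩, hdmem, ?_⟩
    rw [PySem.List.slice_to_natCast, List.append_assoc, List.take_left]
    exact hp
  · rintro ⟨⟨i, c⟩, ⟨k, hk, hik⟩, hdel, hcont⟩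
    simp only [Prod.mk.injEq, zero_add] at hik
    obtain ⟨hi, hc⟩ := hik
    subst hi hc
    rw [PySem.List.slice_to_natCast] at hcont
    refine ⟨lp.take k, hcont, ?_⟩
    have hpre : (lp.take k ++ [lp[k]]) <+: lp := by
      have hstep : lp.take (k + 1) = lp.take k ++ [lp[k]] := by
        rw [List.take_add_one]
        simp [List.getElem?_eq_getElem hk]
      rw [← hstep]
      exact List.take_prefix _ _
    simp only [List.mem_cons, List.not_mem_nil, or_false] at hdel
    rcases hdel with h | h | h
    · exact Or.inl (Or.inl (by rw [← h]; exact hpre))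
    · exact Or.inl (Or.inr (by rw [← h]; exact hpre))
    · exact Or.inr (by rw [← h]; exact hpre)

-- ===== VERDICT (by name: the statement is the Claim_ definition above) =====
theorem is_role_account_spec : Claim_equal_is_role_account := by
  intro email _
  unfold Spec_is_role_account is_role_account is_role_account_alt
  split
  · rfl
  · simp only []
    split
    · rfl
    · exact pv_loop_eq _
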